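-- pv_equiv track=rewrite | github.com/ohsean93/algo | 10월/10_26/winter_coding_2.py | solution
-- ===== SOURCE A (Python) =====
-- def solution(n):
--     answer = []
--     for i in range(n):
--         new_answer = [0]
--         checker = 0
--         for num in answer:
--             checker = (checker + 1) % 2
--
--             new_answer += [num, checker]
--         answer = new_answer
--     return answer
-- ===== SOURCE B (Python) =====
-- def solution(n):
--     def f(k):
--         while k % 2 == 1:
--             k = (k - 1) // 2
--         return 1 if k % 4 == 2 else 0
--     length = 2 ** n - 1 if n > 0 else 0
--     return [f(k) for k in range(length)]
-- ===== Notes on version B (the rewrite author's own statement) =====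
-- stated objective: alternative
-- what changed: Instead of iteratively doubling the list n times, B computes each element independently by a closed-form bit recurrence f(k) (strip trailing 1-bits, then test k%4==2) over range(2**n-1).
import Mathlib
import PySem

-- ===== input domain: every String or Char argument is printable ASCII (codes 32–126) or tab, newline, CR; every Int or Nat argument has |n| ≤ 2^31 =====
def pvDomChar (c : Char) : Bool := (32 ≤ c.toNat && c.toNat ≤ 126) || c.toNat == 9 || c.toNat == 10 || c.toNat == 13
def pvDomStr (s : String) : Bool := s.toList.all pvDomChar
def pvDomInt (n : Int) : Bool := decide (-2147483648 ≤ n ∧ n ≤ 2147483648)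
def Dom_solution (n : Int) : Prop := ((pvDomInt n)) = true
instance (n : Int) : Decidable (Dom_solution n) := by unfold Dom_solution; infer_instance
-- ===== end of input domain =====

-- B replaces A's n-fold list-doubling loop by a per-index closed-form bit recurrence
-- f(k) over range(2^n - 1); same values, genuinely different algorithm (objective: alternative).

-- ===== PORT A =====
-- the '% 2' here always has the positive divisor 2, where Lean's Int.emod and Python's % agree
def solution (n : Int) : List Int :=
  (PySem.List.pyRange 0 n 1).foldl
    (fun answer _ =>
      (answer.foldl
        (fun (p : List Int × Int) num =>
          ((p.1 ++ [num, (p.2 + 1) % 2]), (p.2 + 1) % 2))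
        ([0], 0)).1)
    []

-- ===== PORT B =====
-- Source B's while-loop helper f(k); k is always a nonnegative range element, so it is ported on Nat
-- (where '//' and '%' coincide with Python's), with the loop as the obvious structural recursion
def fB (k : Nat) : Int :=
  if k % 2 = 1 then fB ((k - 1) / 2)
  else if k % 4 = 2 then 1 else 0
termination_by k
decreasing_by omega

def solution_alt (n : Int) : List Int :=
  let length : Int := if 0 < n then 2 ^ n.toNat - 1 else 0
  (PySem.List.pyRange 0 length 1).map (fun k => fB k.toNat)

-- ===== PRECONDITION & SPEC =====
def Spec_solution (n : Int) (out : List Int) : Prop := out = solution_alt n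
instance (n : Int) (out : List Int) : Decidable (Spec_solution n out) := by unfold Spec_solution; infer_instance

-- ===== CLAIM (what is proved, stated in full; the proofs are below) =====
def Claim_equal_solution : Prop := ∀ (n : Int), Dom_solution n → Spec_solution n (solution n)

-- ===== LEMMAS AND PROOFS =====

-- A's outer-loop body, as a function of the current answer
def stepA (ans : List Int) : List Int :=
  (ans.foldl
    (fun (p : List Int × Int) num =>
      ((p.1 ++ [num, (p.2 + 1) % 2]), (p.2 + 1) % 2))
    ([0], 0)).1

-- what A's inner loop emits after the leading 0, given the current checker value
def emit (c : Int) : List Int → List Int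
  | [] => []
  | x :: xs => x :: ((c + 1) % 2) :: emit ((c + 1) % 2) xs

lemma foldl_const_iterate {α β : Type} (g : β → β) :
    ∀ (l : List α) (init : β), l.foldl (fun b _ => g b) init = g^[l.length] init := by
  intro l
  induction l with
  | nil => intro init; rfl
  | cons x xs ih =>
      intro init
      simp only [List.foldl_cons, List.length_cons, Function.iterate_succ_apply, ih]

lemma innerFold (xs : List Int) : ∀ (acc : List Int) (c : Int),
    (xs.foldl
      (fun (p : List Int × Int) num =>
        ((p.1 ++ [num, (p.2 + 1) % 2]), (p.2 + 1) % 2))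
      (acc, c)).1 = acc ++ emit c xs := by
  induction xs with
  | nil => intro acc c; simp [emit]
  | cons x xs ih =>
      intro acc c
      simp only [List.foldl_cons, emit, ih]
      simp

lemma stepA_eq (ans : List Int) : stepA ans = 0 :: emit 0 ans := by
  unfold stepA
  rw [innerFold]
  simp

lemma fB_zero : fB 0 = 0 := by simp [fB]

lemma fB_odd (j : Nat) : fB (2 * j + 1) = fB j := by
  rw [fB]
  have h1 : (2 * j + 1) % 2 = 1 := by omega
  simp [h1]


lemma fB_even (j : Nat) : fB (2 * j + 2) = ((j : Int) + 1) % 2 := by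
  rw [fB]
  have h1 : (2 * j + 2) % 2 = 0 := by omega
  rcases Nat.even_or_odd j with ⟨m, hm⟩ | ⟨m, hm⟩
  · have h2 : (2 * j + 2) % 4 = 2 := by omega
    have h3 : ((j : Int) + 1) % 2 = 1 := by
      subst hm; push_cast; omega
    simp [h1, h2, h3]
  · have h2 : (2 * j + 2) % 4 ≠ 2 := by omega
    have h3 : ((j : Int) + 1) % 2 = 0 := by
      subst hm; push_cast; omega
    simp [h1, h2, h3]

lemma emit_range' : ∀ (L j : Nat),
    emit ((j : Int) % 2) ((List.range' j L).map (fun k => fB k)) =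
      (List.range' (2 * j + 1) (2 * L)).map (fun k => fB k) := by
  intro L
  induction L with
  | zero => intro j; simp [emit]
  | succ L ih =>
      intro j
      have hc : ((j : Int) % 2 + 1) % 2 = ((j + 1 : Nat) : Int) % 2 := by push_cast; omega
      have hR : 2 * (L + 1) = (2 * L + 1) + 1 := by omega
      rw [List.range'_succ, List.map_cons, emit, hc, ih (j + 1)]
      rw [hR, List.range'_succ, List.range'_succ, List.map_cons, List.map_cons]
      have e1 : fB (2 * j + 1) = fB j := fB_odd j
      have e2 : fB (2 * j + 1 + 1) = ((j : Int) + 1) % 2 := by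
        have : 2 * j + 1 + 1 = 2 * j + 2 := by omega
        rw [this, fB_even]
      have hc2 : ((j + 1 : Nat) : Int) % 2 = ((j : Int) + 1) % 2 := by push_cast; ring_nf
      have harg : 2 * (j + 1) + 1 = 2 * j + 1 + 1 + 1 := by omega
      rw [e1, e2, hc2, harg]

lemma stepA_map_range (L : Nat) :
    stepA ((List.range L).map (fun k => fB k)) =
      (List.range (2 * L + 1)).map (fun k => fB k) := by
  rw [stepA_eq]
  have h0 : (0 : Int) = ((0 : Nat) : Int) % 2 := by norm_num
  rw [List.range_eq_range', h0, emit_range' L 0]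
  rw [List.range_eq_range', List.range'_succ]
  simp [fB_zero]

lemma iterate_stepA (m : Nat) :
    stepA^[m] [] = (List.range (2 ^ m - 1)).map (fun k => fB k) := by
  induction m with
  | zero => simp
  | succ m ih =>
      rw [Function.iterate_succ_apply', ih, stepA_map_range]
      have h1 : 1 ≤ 2 ^ m := Nat.one_le_two_pow
      have h2 : 2 * (2 ^ m - 1) + 1 = 2 ^ (m + 1) - 1 := by
        rw [pow_succ]; omega
      rw [h2]

lemma solution_eq_iterate (n : Int) : solution n = stepA^[n.toNat] [] := by
  show (PySem.List.pyRange 0 n 1).foldl (fun b _ => stepA b) [] = _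
  rw [foldl_const_iterate stepA]
  congr 1
  rw [PySem.List.length_pyRange_one]
  simp

theorem solution_spec : Claim_equal_solution := by
  intro n _
  unfold Spec_solution solution_alt
  rw [solution_eq_iterate, iterate_stepA]
  by_cases hn : 0 < n
  · simp only [hn, if_pos]
    have hL : (0 : Int) ≤ 2 ^ n.toNat - 1 := by
      have : (1 : Int) ≤ 2 ^ n.toNat := one_le_pow₀ (by norm_num)
      omega
    rw [PySem.List.pyRange_one]
    simp only [sub_zero, zero_add]
    have hT : ((2 : Int) ^ n.toNat - 1).toNat = 2 ^ n.toNat - 1 := by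
      have hpow : ((2 ^ n.toNat : Nat) : Int) = 2 ^ n.toNat := by push_cast; rfl
      have h1 : 1 ≤ (2 ^ n.toNat : Nat) := Nat.one_le_two_pow
      omega
    rw [hT, List.map_map]
    apply List.map_congr_left
    intro k hk
    simp
  · have h0 : n.toNat = 0 := by omega
    simp [hn, h0]
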